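-- pv_equiv track=rewrite | github.com/ihyatafsir/tajweedtts | render_video_overlay.py | find_active_idx
-- ===== SOURCE A (Python) =====
-- def find_active_idx(timing, t):
--     if not timing or t < timing[0]['start']:
--         return -1
--     if t >= timing[-1]['start']:
--         return timing[-1]['idx']
--
--     lo, hi = 0, len(timing) - 1
--     while lo < hi:
--         mid = (lo + hi + 1) // 2
--         if timing[mid]['start'] <= t:
--             lo = mid
--         else:
--             hi = mid - 1
--     return timing[lo]['idx']
-- ===== SOURCE B (Python) =====
-- def find_active_idx(timing, t):
--     # Linear scan over the start-sorted segments: remember the idx of the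
--     # latest segment whose start is <= t, stop at the first start > t.
--     result = -1
--     for seg in timing:
--         if seg['start'] > t:
--             break
--         result = seg['idx']
--     return result
-- ===== Notes on version B (the rewrite author's own statement) =====
-- stated objective: simpler
-- what changed: Replaced the head/tail guards plus binary search over [lo,hi] by a single front-to-back linear scan that keeps one 'result' index and stops at the first segment with start > t.
-- outside the precondition, e.g. on find_active_idx([{'start': 0}, {'idx': 3}, {'idx': 6, 'start': -2}], 6): A returns 6, B raises KeyError
import Mathlib
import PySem

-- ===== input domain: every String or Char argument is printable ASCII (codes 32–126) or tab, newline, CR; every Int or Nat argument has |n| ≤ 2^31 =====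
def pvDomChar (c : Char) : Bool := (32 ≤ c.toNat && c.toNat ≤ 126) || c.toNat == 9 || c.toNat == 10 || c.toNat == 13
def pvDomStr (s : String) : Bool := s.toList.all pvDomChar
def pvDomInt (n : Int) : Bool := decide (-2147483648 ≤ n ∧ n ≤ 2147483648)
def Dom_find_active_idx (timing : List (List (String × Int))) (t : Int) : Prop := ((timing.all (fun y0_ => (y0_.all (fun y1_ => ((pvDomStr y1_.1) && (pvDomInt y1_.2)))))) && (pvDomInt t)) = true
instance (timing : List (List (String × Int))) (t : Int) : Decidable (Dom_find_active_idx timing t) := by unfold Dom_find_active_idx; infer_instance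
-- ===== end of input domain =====

-- B replaces A's binary search (with its separate head/tail guards) by a single
-- front-to-back linear scan keeping one 'result' index: simpler, same values on
-- start-sorted segment lists.


-- ===== PORT A =====
-- seg['start'] / seg['idx'] : first-match association lookup; Pre_ guarantees the
-- keys are present, so the .getD 0 default is never taken on admitted inputs.
def startOf (d : List (String × Int)) : Int := ((PySem.Dict.mk d).get? "start").getD 0
def idxOf (d : List (String × Int)) : Int := ((PySem.Dict.mk d).get? "idx").getD 0

-- the while-loop of A; lo, hi are always in-range indices (0 ≤ lo ≤ hi < len),
-- so timing[mid] is rendered as getD with an unused default; (lo+hi+1)//2 on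
-- nonnegative ints is Nat division.
def faLoop (timing : List (List (String × Int))) (t : Int) (lo hi : Nat) : Int :=
  if h : lo < hi then
    let mid := (lo + hi + 1) / 2
    if startOf (timing.getD mid []) ≤ t then faLoop timing t mid hi
    else faLoop timing t lo (mid - 1)
  else idxOf (timing.getD lo [])
termination_by hi - lo
decreasing_by all_goals omega

def find_active_idx (timing : List (List (String × Int))) (t : Int) : Int :=
  -- timing[0] / timing[-1] rendered via getD at 0 / length-1 (in range: timing ≠ [] there)
  if timing = [] ∨ t < startOf (timing.getD 0 []) then -1
  else if t ≥ startOf (timing.getD (timing.length - 1) []) then idxOf (timing.getD (timing.length - 1) [])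
  else faLoop timing t 0 (timing.length - 1)

-- ===== PORT B =====
-- the for-loop with break: carry 'result', stop at the first start > t
def fbGo (t : Int) : List (List (String × Int)) → Int → Int
  | [], res => res
  | seg :: rest, res => if startOf seg > t then res else fbGo t rest (idxOf seg)

def find_active_idx_alt (timing : List (List (String × Int))) (t : Int) : Int :=
  fbGo t timing (-1)

-- ===== PRECONDITION & SPEC =====
def hasStartB (d : List (String × Int)) : Bool := ((PySem.Dict.mk d).get? "start").isSome
def hasIdxB (d : List (String × Int)) : Bool := ((PySem.Dict.mk d).get? "idx").isSome

-- Pre_ excludes (a) inputs on which a missing 'start'/'idx' key makes A (or B's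
-- scan, which reads the keys of every segment with start ≤ t) raise KeyError —
-- keys are only required where one of the programs reads them — and (b) past the
-- early-return guards, lists in which the segments with start ≤ t do not form a
-- prefix (guaranteed when the list is sorted by 'start', as the binary search
-- assumes): there the probe order makes A's answer accidental.
def Pre_find_active_idx (timing : List (List (String × Int))) (t : Int) : Prop :=
  timing = [] ∨
  (hasStartB (timing.getD 0 []) = true ∧
    (t < startOf (timing.getD 0 []) ∨
      ((∀ d ∈ timing, hasStartB d = true ∧ (startOf d ≤ t → hasIdxB d = true)) ∧
       (∀ i < timing.length, ∀ j < i, startOf (timing.getD i []) ≤ t → startOf (timing.getD j []) ≤ t))))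
instance (timing : List (List (String × Int))) (t : Int) : Decidable (Pre_find_active_idx timing t) := by unfold Pre_find_active_idx; infer_instance

def pvWitness_find_active_idx : (List (List (String × Int))) × Int :=
  ([[("start", 0), ("idx", 0)], [("start", 5), ("idx", 1)]], 3)

def Spec_find_active_idx (timing : List (List (String × Int))) (t : Int) (out : Int) : Prop := out = find_active_idx_alt timing t
instance (timing : List (List (String × Int))) (t : Int) (out : Int) : Decidable (Spec_find_active_idx timing t out) := by unfold Spec_find_active_idx; infer_instance

-- ===== CLAIM (what is proved, stated in full; the proofs are below) =====
def Claim_equal_find_active_idx : Prop := ∀ (timing : List (List (String × Int))) (t : Int), Dom_find_active_idx timing t → Pre_find_active_idx timing t → Spec_find_active_idx timing t (find_active_idx timing t)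

-- ===== LEMMAS AND PROOFS =====

-- the number of leading segments with start ≤ t
def kOf (timing : List (List (String × Int))) (t : Int) : Nat :=
  ((timing.map startOf).takeWhile (fun x => decide (x ≤ t))).length

lemma kOf_le_length (timing : List (List (String × Int))) (t : Int) :
    kOf timing t ≤ timing.length := by
  exact le_trans (List.Sublist.length_le (List.takeWhile_sublist _)) (by simp)

-- if the elements ≤ t are downward closed (a prefix), membership in the
-- takeWhile-prefix characterises x ≤ t
lemma dc_le_iff_lt_k (t : Int) :
    ∀ (l : List Int), (∀ i < l.length, ∀ j < i, l.getD i 0 ≤ t → l.getD j 0 ≤ t) →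
      ∀ i (h : i < l.length),
      (l[i] ≤ t ↔ i < (l.takeWhile (fun x => decide (x ≤ t))).length) := by
  intro l
  induction l with
  | nil => intro _ i h; simp at h
  | cons x xs ih =>
    intro hdc i h
    by_cases hx : x ≤ t
    · rw [List.takeWhile_cons_of_pos (by simpa using hx)]
      cases i with
      | zero => simpa using hx
      | succ j =>
        have hdc' : ∀ i < xs.length, ∀ j < i, xs.getD i 0 ≤ t → xs.getD j 0 ≤ t := by
          intro i hi j hj hle
          have := hdc (i + 1) (by simpa using hi) (j + 1) (by omega) (by simpa using hle)
          simpa using this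
        have := ih hdc' j (by simpa using h)
        simpa using this
    · rw [List.takeWhile_cons_of_neg (by simpa using hx)]
      cases i with
      | zero => simpa using hx
      | succ j =>
        simp only [List.getElem_cons_succ, List.length_nil]
        constructor
        · intro hle
          have := hdc (j + 1) (by simpa using h) 0 (by omega)
            (by simpa [List.getD_eq_getElem?_getD, List.getElem?_eq_getElem (by simpa using h : j < xs.length)] using hle)
          simp at this
          exact absurd this hx
        · omega

lemma getD_eq_getElem' (timing : List (List (String × Int))) (i : Nat) (h : i < timing.length) :
    timing.getD i [] = timing[i] := by
  simp [List.getD_eq_getElem?_getD, List.getElem?_eq_getElem h]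

-- B characterised through kOf (no sortedness needed)
lemma fbGo_char (t : Int) :
    ∀ (xs : List (List (String × Int))) (res : Int),
      fbGo t xs res =
        if kOf xs t = 0 then res else idxOf (xs.getD (kOf xs t - 1) []) := by
  intro xs
  induction xs with
  | nil => intro res; simp [fbGo, kOf]
  | cons seg rest ih =>
    intro res
    by_cases hs : startOf seg > t
    · have : kOf (seg :: rest) t = 0 := by
        simp [kOf, List.takeWhile_cons_of_neg, show ¬ startOf seg ≤ t by omega]
      simp [fbGo, hs, this]
    · have hle : startOf seg ≤ t := by omega
      have hk : kOf (seg :: rest) t = kOf rest t + 1 := by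
        simp [kOf, List.takeWhile_cons_of_pos, hle]
      rw [show fbGo t (seg :: rest) res = fbGo t rest (idxOf seg) by simp [fbGo, hs]]
      rw [ih (idxOf seg), hk]
      by_cases hk0 : kOf rest t = 0
      · simp [hk0]
      · have h1 : kOf rest t + 1 - 1 = (kOf rest t - 1) + 1 := by omega
        simp only [hk0, if_false, Nat.succ_ne_zero, Nat.add_sub_cancel]
        rw [show kOf rest t = (kOf rest t - 1) + 1 by omega]
        simp

-- A's loop, under the two k-facts, converges to index k-1
lemma faLoop_eq (timing : List (List (String × Int))) (t : Int) (k : Nat)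
    (hk1 : ∀ i, i < k → startOf (timing.getD i []) ≤ t)
    (hk2 : ∀ i, k ≤ i → i < timing.length → t < startOf (timing.getD i []))
    (hkpos : 1 ≤ k) :
    ∀ d lo hi, hi - lo = d → lo ≤ k - 1 → k - 1 ≤ hi → hi < timing.length →
      faLoop timing t lo hi = idxOf (timing.getD (k - 1) []) := by
  intro d
  induction d using Nat.strong_induction_on with
  | _ d ih =>
    intro lo hi hd hlo hhi hhin
    rw [faLoop]
    by_cases h : lo < hi
    · simp only [dif_pos h]
      set mid := (lo + hi + 1) / 2 with hmid
      have hmlo : lo < mid := by omega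
      have hmhi : mid ≤ hi := by omega
      by_cases hs : startOf (timing.getD mid []) ≤ t
      · have hmk : mid ≤ k - 1 := by
          by_contra hc
          exact absurd hs (not_le.mpr (hk2 mid (by omega) (by omega)))
        rw [if_pos hs]
        exact ih (hi - mid) (by omega) mid hi rfl hmk hhi hhin
      · have hmk : k - 1 ≤ mid - 1 := by
          by_contra hc
          exact hs (hk1 mid (by omega))
        rw [if_neg hs]
        exact ih ((mid - 1) - lo) (by omega) lo (mid - 1) rfl hlo hmk (by omega)
    · simp only [dif_neg h]
      have : lo = k - 1 := by omega
      rw [this]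

-- the two k-facts, from sortedness
lemma k_facts (timing : List (List (String × Int))) (t : Int)
    (hp : ∀ i < timing.length, ∀ j < i,
      startOf (timing.getD i []) ≤ t → startOf (timing.getD j []) ≤ t) :
    (∀ i, i < kOf timing t → startOf (timing.getD i []) ≤ t) ∧
    (∀ i, kOf timing t ≤ i → i < timing.length → t < startOf (timing.getD i [])) := by
  have key : ∀ i (h : i < timing.length),
      (startOf (timing.getD i []) ≤ t ↔ i < kOf timing t) := by
    intro i h
    have hdc : ∀ i < (timing.map startOf).length, ∀ j < i,
        (timing.map startOf).getD i 0 ≤ t → (timing.map startOf).getD j 0 ≤ t := by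
      intro i hi j hj hle
      have hi' : i < timing.length := by simpa using hi
      have hj' : j < timing.length := by omega
      have e : ∀ m (hm : m < timing.length),
          (timing.map startOf).getD m 0 = startOf (timing.getD m []) := by
        intro m hm
        rw [getD_eq_getElem' timing m hm]
        simp [List.getD_eq_getElem?_getD, List.getElem?_eq_getElem (by simpa using hm :
          m < (timing.map startOf).length)]
      rw [e i hi', e j hj'] at *
      exact hp i hi' j hj hle
    have := dc_le_iff_lt_k t (timing.map startOf) hdc i (by simpa using h)
    rw [getD_eq_getElem' timing i h]
    simpa [kOf] using this
  constructor
  · intro i hi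
    have hlen : i < timing.length := lt_of_lt_of_le hi (kOf_le_length timing t)
    exact (key i hlen).mpr hi
  · intro i hi hlen
    have := (key i hlen).not
    omega

-- ===== VERDICT (by name: the statement is the Claim_ definition above) =====
theorem find_active_idx_spec : Claim_equal_find_active_idx := by
  intro timing t _hdom hpre
  unfold Spec_find_active_idx find_active_idx find_active_idx_alt
  rcases hpre with hemp | ⟨hs0, hcase⟩
  · subst hemp; simp [fbGo]
  rcases hcase with hlt | ⟨-, hpc⟩
  · cases timing with
    | nil => exact absurd hs0 (by decide)
    | cons d rest =>
      rw [if_pos (Or.inr hlt)]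
      have hd : startOf ((d :: rest).getD 0 []) = startOf d := by simp
      rw [hd] at hlt
      simp [fbGo, show ¬ startOf d ≤ t by omega, show startOf d > t by omega]
  have hfacts := k_facts timing t hpc
  set k := kOf timing t with hkdef
  have hklen : k ≤ timing.length := kOf_le_length timing t
  rw [fbGo_char t timing (-1)]
  by_cases h1 : timing = [] ∨ t < startOf (timing.getD 0 [])
  · rw [if_pos h1]
    have hk0 : k = 0 := by
      by_contra hk
      rcases h1 with h1 | h1
      · rw [h1] at hklen; simp at hklen; omega
      · exact absurd (hfacts.1 0 (by omega)) (not_le.mpr h1)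
    rw [hkdef] at hk0
    simp [hk0]
  · rw [if_neg h1]
    push_neg at h1
    obtain ⟨hne, h0⟩ := h1
    have hnpos : 0 < timing.length := List.length_pos_of_ne_nil hne
    have hkpos : 1 ≤ k := by
      by_contra hk
      exact absurd h0 (not_le.mpr (hfacts.2 0 (by omega) hnpos))
    by_cases h2 : t ≥ startOf (timing.getD (timing.length - 1) [])
    · rw [if_pos h2]
      have hkn : k = timing.length := by
        by_contra hk
        exact absurd h2 (not_le.mpr (hfacts.2 (timing.length - 1) (by omega) (by omega)))
      rw [hkdef] at hkn
      simp [hkn, hne]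
    · rw [if_neg h2]
      push_neg at h2
      have hkn : k ≤ timing.length - 1 := by
        by_contra hk
        exact absurd (hfacts.1 (timing.length - 1) (by omega)) (not_le.mpr h2)
      rw [faLoop_eq timing t k hfacts.1 hfacts.2 hkpos (timing.length - 1 - 0) 0
        (timing.length - 1) rfl (by omega) (by omega) (by omega)]
      rw [hkdef]
      simp [show kOf timing t ≠ 0 by omega]
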